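-- pv_equiv track=rewrite | github.com/goo314/problem-solving | study-w-gahyeon/2025-04-14/45.py | solution
-- ===== SOURCE A (Python) =====
-- def solution(progresses, speeds):
--     ans = []
--
--     n = len(progresses)
--     periods = []
--     for i in range(n):
--         p, s = progresses[i], speeds[i]
--         d = (100-p)//s
--         if (100-p)%s > 0:
--             d += 1
--         periods.append(d)
--
--     m, cnt = periods[0], 1
--     for i in range(1, n):
--         if m < periods[i]:
--             ans.append(cnt)
--             m, cnt = periods[i], 1
--         else:
--             cnt += 1
--     ans.append(cnt)
--
--     return ans
-- ===== SOURCE B (Python) =====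
-- def solution(progresses, speeds):
--     periods = [(100 - p) // s + (1 if (100 - p) % s > 0 else 0)
--                for p, s in zip(progresses, speeds)]
--     # prefix maxima of periods
--     maxes = []
--     m = None
--     for x in periods:
--         m = x if m is None or x > m else m
--         maxes.append(m)
--     # a new group starts exactly where the prefix max strictly increases
--     starts = [i + 1 for i, (a, b) in enumerate(zip(maxes, maxes[1:])) if b > a]
--     # group sizes are the gaps between consecutive group boundaries
--     bounds = [0] + starts + [len(periods)]
--     return [b - a for a, b in zip(bounds, bounds[1:])]
-- ===== Notes on version B (the rewrite author's own statement) =====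
-- stated objective: alternative
-- what changed: Instead of A's single stateful scan that carries a (leader, count) pair and emits counts on the fly, B computes the list of prefix maxima, extracts the boundary indices where the prefix max strictly increases, and returns the group sizes as differences of consecutive boundaries.
import Mathlib
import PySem

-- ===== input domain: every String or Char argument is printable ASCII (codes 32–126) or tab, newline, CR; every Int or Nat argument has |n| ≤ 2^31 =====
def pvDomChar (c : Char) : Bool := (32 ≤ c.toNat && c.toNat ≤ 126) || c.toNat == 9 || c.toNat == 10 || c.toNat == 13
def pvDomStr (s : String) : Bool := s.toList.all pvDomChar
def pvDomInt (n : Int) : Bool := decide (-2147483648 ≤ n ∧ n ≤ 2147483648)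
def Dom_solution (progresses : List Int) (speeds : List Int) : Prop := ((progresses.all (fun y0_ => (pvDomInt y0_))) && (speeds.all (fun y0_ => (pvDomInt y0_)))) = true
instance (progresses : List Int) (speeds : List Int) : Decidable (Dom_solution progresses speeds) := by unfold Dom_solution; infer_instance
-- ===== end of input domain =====

-- B replaces A's stateful (leader,count) scan by prefix maxima + boundary indices + differences; objective: alternative.

-- ===== PORT A =====
-- d = (100-p)//s; if (100-p)%s > 0: d += 1
def pvPeriodA (p s : Int) : Int :=
  let d := PySem.Int.floordiv (100 - p) s
  if PySem.Int.mod (100 - p) s > 0 then d + 1 else d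

-- for i in range(n): periods.append(pvPeriodA(progresses[i], speeds[i]))
-- (structural recursion over the two lists; Pre_ guarantees speeds is long enough)
def pvPeriodsA : List Int → List Int → List Int
  | p :: ps, s :: ss => pvPeriodA p s :: pvPeriodsA ps ss
  | _, _ => []

-- A's second loop: state (m, cnt); the final 'ans.append(cnt)' is the [] case
def pvScanA (m cnt : Int) : List Int → List Int
  | [] => [cnt]
  | x :: t => if m < x then cnt :: pvScanA x 1 t else pvScanA m (cnt + 1) t

def solution (progresses : List Int) (speeds : List Int) : List Int :=
  let periods := pvPeriodsA progresses speeds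
  match periods with
  | [] => []                      -- Python raises IndexError at periods[0]; excluded by Pre_
  | h :: t => pvScanA h 1 t

-- ===== PORT B =====
-- periods = [(100-p)//s + (1 if (100-p)%s > 0 else 0) for p, s in zip(progresses, speeds)]
def pvPeriodsB (progresses speeds : List Int) : List Int :=
  (progresses.zip speeds).map (fun pr =>
    PySem.Int.floordiv (100 - pr.1) pr.2 +
      (if PySem.Int.mod (100 - pr.1) pr.2 > 0 then 1 else 0))

-- m = None; for x in periods: m = x if m is None or x > m else m; maxes.append(m)
def pvMaxLoop : Option Int → List Int → List Int
  | _, [] => []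
  | m?, x :: t =>
    let m := match m? with
      | none => x
      | some mm => if x > mm then x else mm
    m :: pvMaxLoop (some m) t

-- starts = [i + 1 for i, (a, b) in enumerate(zip(maxes, maxes[1:])) if b > a]
def pvStarts (maxes : List Int) : List Int :=
  ((PySem.List.enumerate (maxes.zip (PySem.List.slice maxes (some 1) none))).filter
      (fun pr => pr.2.2 > pr.2.1)).map (fun pr => pr.1 + 1)

-- bounds = [0] + starts + [len(periods)]; return [b - a for a, b in zip(bounds, bounds[1:])]
def solution_alt (progresses : List Int) (speeds : List Int) : List Int :=
  let periods := pvPeriodsB progresses speeds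
  let maxes := pvMaxLoop none periods
  let starts := pvStarts maxes
  let bounds := 0 :: (starts ++ [(periods.length : Int)])
  (bounds.zip (PySem.List.slice bounds (some 1) none)).map (fun pr => pr.2 - pr.1)

-- ===== PRECONDITION & SPEC =====
-- A raises IndexError on empty progresses or when speeds is shorter than progresses,
-- and ZeroDivisionError when a used speed is 0; Pre_ excludes exactly those.
def Pre_solution (progresses : List Int) (speeds : List Int) : Prop :=
  progresses ≠ [] ∧ progresses.length ≤ speeds.length ∧
    ∀ s ∈ speeds.take progresses.length, s ≠ 0
instance (progresses : List Int) (speeds : List Int) : Decidable (Pre_solution progresses speeds) := by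
  unfold Pre_solution; infer_instance

def pvWitness_solution : List Int × List Int := ([93, 30, 55], [1, 30, 5])

def Spec_solution (progresses : List Int) (speeds : List Int) (out : List Int) : Prop :=
  out = solution_alt progresses speeds
instance (progresses : List Int) (speeds : List Int) (out : List Int) : Decidable (Spec_solution progresses speeds out) := by unfold Spec_solution; infer_instance

-- ===== CLAIM (what is proved, stated in full; the proofs are below) =====
def Claim_equal_solution : Prop := ∀ (progresses : List Int) (speeds : List Int), Dom_solution progresses speeds → Pre_solution progresses speeds → Spec_solution progresses speeds (solution progresses speeds)

-- ===== LEMMAS AND PROOFS =====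

-- proof-side: indices (1-based labels starting at k) where an element exceeds the running max
def recPos (m k : Int) : List Int → List Int
  | [] => []
  | x :: t => if m < x then k :: recPos x (k + 1) t else recPos m (k + 1) t

-- proof-side: differences of consecutive boundaries
def diffs (a : Int) : List Int → List Int
  | [] => []
  | b :: t => (b - a) :: diffs b t

-- the two period-list constructions agree (same formula, different traversal)
theorem periods_eq (ps ss : List Int) : pvPeriodsB ps ss = pvPeriodsA ps ss := by
  induction ps generalizing ss with
  | nil => cases ss <;> simp [pvPeriodsA, pvPeriodsB]
  | cons p pt ih =>
    cases ss with
    | nil => simp [pvPeriodsA, pvPeriodsB]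
    | cons s st =>
      have hcons : pvPeriodsB (p :: pt) (s :: st) = pvPeriodA p s :: pvPeriodsB pt st := by
        simp only [pvPeriodsB, List.zip_cons_cons, List.map_cons, pvPeriodA]
        split <;> simp
      rw [hcons, ih st, pvPeriodsA]

-- B's zip-of-adjacent-pairs differences are the recursive diffs
theorem zipdiff_eq (a : Int) (t : List Int) :
    (((a :: t).zip t).map (fun pr => pr.2 - pr.1)) = diffs a t := by
  induction t generalizing a with
  | nil => simp [diffs]
  | cons b t ih => simp [diffs, ih b]

-- B's enumerate/filter/map start extraction equals the recursive record positions
theorem starts_eq (t : List Int) (m k : Int) :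
    (((PySem.List.enumerate ((m :: pvMaxLoop (some m) t).zip (pvMaxLoop (some m) t)) k).filter
        (fun pr => pr.2.2 > pr.2.1)).map (fun pr => pr.1 + 1)) = recPos m (k + 1) t := by
  induction t generalizing m k with
  | nil => simp [pvMaxLoop, recPos]
  | cons x t ih =>
    by_cases hx : m < x
    · have hx' : x > m := hx
      simp only [pvMaxLoop, if_pos hx', List.zip_cons_cons,
        PySem.List.enumerate_cons, List.filter_cons, recPos]
      simp only [gt_iff_lt, decide_eq_true_eq]
      rw [if_pos hx]
      simp only [List.map_cons]
      rw [ih x (k + 1)]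
    · have hx' : ¬ x > m := hx
      simp only [pvMaxLoop, if_neg hx', List.zip_cons_cons,
        PySem.List.enumerate_cons, List.filter_cons, recPos]
      simp only [gt_iff_lt, decide_eq_true_eq]
      rw [if_neg (lt_irrefl m)]
      rw [ih m (k + 1)]

-- the boundary differences of the record positions are A's group counts
theorem diffs_recPos (t : List Int) (m b j : Int) :
    diffs b (recPos m j t ++ [j + (t.length : Int)]) = pvScanA m (j - b) t := by
  induction t generalizing m b j with
  | nil => simp [recPos, diffs, pvScanA]
  | cons x t ih =>
    simp only [recPos, pvScanA, List.length_cons]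
    by_cases hx : m < x
    · simp only [if_pos hx, List.cons_append, diffs]
      have h1 : j + ((t.length : Int) + 1) = (j + 1) + (t.length : Int) := by ring
      push_cast
      rw [h1, ih x j (j + 1)]
      norm_num
    · simp only [if_neg hx]
      have h1 : j + (((t.length : Int)) + 1) = (j + 1) + (t.length : Int) := by ring
      push_cast
      rw [h1, ih m b (j + 1)]
      have : j + 1 - b = j - b + 1 := by ring
      rw [this]

theorem maxLoop_none (h : Int) (t : List Int) :
    pvMaxLoop none (h :: t) = h :: pvMaxLoop (some h) t := by
  simp [pvMaxLoop]

-- ===== VERDICT (by name: the statement is the Claim_ definition above) =====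
theorem solution_spec : Claim_equal_solution := by
  intro ps ss _ hpre
  obtain ⟨hne, hlen, _⟩ := hpre
  unfold Spec_solution solution solution_alt
  rw [periods_eq ps ss]
  cases hP : pvPeriodsA ps ss with
  | nil =>
    exfalso
    cases ps with
    | nil => exact hne rfl
    | cons p pt =>
      cases ss with
      | nil => simp at hlen
      | cons s st => simp [pvPeriodsA] at hP
  | cons h t =>
    simp only [maxLoop_none, pvStarts, PySem.List.slice_from_one]
    have htail : (h :: pvMaxLoop (some h) t).tail = pvMaxLoop (some h) t := rfl
    rw [htail, starts_eq t h 0]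
    simp only [List.tail_cons, zipdiff_eq, zero_add]
    have hl : ((h :: t).length : Int) = 1 + (t.length : Int) := by
      simp only [List.length_cons]; push_cast; omega
    rw [hl, diffs_recPos t h 0 1]
    norm_num
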